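-- pv_equiv track=rewrite | github.com/wkabrich/AdventOfCode | 2015/05/main.py | validate1
-- ===== SOURCE A (Python) =====
-- def validate1(word):
--     vowels = ['a', 'e', 'i', 'o', 'u']
--     baddies = ['ab', 'cd', 'pq', 'xy']
--
--     vowelsCount = 0
--     doublesCount = 0
--
--     for i in range(len(word)):
--         sub = word[i:i+2]
--
--         if vowels.count(word[i]):
--             vowelsCount += 1
--
--         if len(sub) > 1:
--             if sub[0] == sub[1]:
--                 doublesCount += 1
--
--         if baddies.count(sub):
--             return 0
--
--     if vowelsCount >= 3 and doublesCount >= 1: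
--         return 1
--     else:
--         return 0
-- ===== SOURCE B (Python) =====
-- def validate1(word):
--     vowels = sum(1 for c in word if c in "aeiou")
--     has_double = any(a == b for a, b in zip(word, word[1:]))
--     has_bad = any(b in word for b in ("ab", "cd", "pq", "xy"))
--     return 1 if vowels >= 3 and has_double and not has_bad else 0
-- ===== Notes on version B (the rewrite author's own statement) =====
-- stated objective: simpler
-- what changed: Replaces the fused index loop with early return by three independent whole-string passes (vowel count, adjacent-double scan via zip, substring test per bad pair) combined in one boolean expression.
import Mathlib
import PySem

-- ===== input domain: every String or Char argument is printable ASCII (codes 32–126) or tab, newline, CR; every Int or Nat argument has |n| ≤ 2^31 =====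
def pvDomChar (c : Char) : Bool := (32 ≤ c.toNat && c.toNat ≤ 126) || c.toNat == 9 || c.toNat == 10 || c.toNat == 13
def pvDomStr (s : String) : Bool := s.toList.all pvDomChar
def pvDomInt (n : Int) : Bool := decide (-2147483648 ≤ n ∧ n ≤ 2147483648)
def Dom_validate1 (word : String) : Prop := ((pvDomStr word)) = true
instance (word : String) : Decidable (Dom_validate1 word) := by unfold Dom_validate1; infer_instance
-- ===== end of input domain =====

-- B replaces A's fused index loop (with early return) by three independent whole-string passes combined in one boolean expression; same cost, simpler.

-- ===== PORT A =====
def pvVowels : List Char := ['a', 'e', 'i', 'o', 'u']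
def pvBaddies : List (List Char) := [['a','b'], ['c','d'], ['p','q'], ['x','y']]

-- the for-loop over range(len(word)) with its two counters and the early return
def validate1Go (cs : List Char) (i vc dc : Nat) : Int :=
  if h : i < cs.length then
    let sub := PySem.List.slice cs (some (i : Int)) (some ((i : Int) + 2))
    let vc' := if pvVowels.count cs[i] ≠ 0 then vc + 1 else vc
    let dc' := if 1 < sub.length then
                 (if sub.getD 0 ' ' = sub.getD 1 ' ' then dc + 1 else dc)
               else dc
    if pvBaddies.count sub ≠ 0 then 0
    else validate1Go cs (i + 1) vc' dc'
  else
    if 3 ≤ vc ∧ 1 ≤ dc then 1 else 0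
termination_by cs.length - i

def validate1 (word : String) : Int := validate1Go word.toList 0 0 0

-- ===== PORT B =====
def validate1_alt (word : String) : Int :=
  let cs := word.toList
  let vowels := cs.countP (fun c => c ∈ "aeiou".toList)
  let hasDouble := (cs.zip cs.tail).any (fun p => p.1 == p.2)
  let hasBad := (["ab", "cd", "pq", "xy"] : List String).any (fun b => PySem.Str.isIn b word)
  if 3 ≤ vowels ∧ hasDouble = true ∧ hasBad = false then 1 else 0

-- ===== PRECONDITION & SPEC =====
def Spec_validate1 (word : String) (out : Int) : Prop := out = validate1_alt word
instance (word : String) (out : Int) : Decidable (Spec_validate1 word out) := by unfold Spec_validate1; infer_instance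

-- ===== CLAIM (what is proved, stated in full; the proofs are below) =====
def Claim_equal_validate1 : Prop := ∀ (word : String), Dom_validate1 word → Spec_validate1 word (validate1 word)

-- ===== LEMMAS AND PROOFS =====

-- the adjacent pairs of a word
def pvPairs (l : List Char) : List (Char × Char) := l.zip l.tail

def pvBadB (l : List Char) : Bool := (pvPairs l).any (fun p => decide ([p.1, p.2] ∈ pvBaddies))
def pvNv (l : List Char) : Nat := l.countP (fun c => c ∈ "aeiou".toList)
def pvNd (l : List Char) : Nat := (pvPairs l).countP (fun p => p.1 == p.2)

theorem pvPairs_cons (a b : Char) (l : List Char) :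
    pvPairs (a :: b :: l) = (a, b) :: pvPairs (b :: l) := by
  simp [pvPairs]

theorem pvPairs_single (a : Char) : pvPairs [a] = [] := by simp [pvPairs]
theorem pvPairs_nil : pvPairs [] = [] := by simp [pvPairs]

theorem pvNv_cons (c : Char) (l : List Char) :
    pvNv (c :: l) = pvNv l + (if c ∈ "aeiou".toList then 1 else 0) := by
  simp [pvNv, List.countP_cons]

theorem pvNv_nil : pvNv [] = 0 := rfl

theorem pvNd_cons (a b : Char) (l : List Char) :
    pvNd (a :: b :: l) = pvNd (b :: l) + (if a = b then 1 else 0) := by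
  simp [pvNd, pvPairs_cons, List.countP_cons]

theorem pvNd_single (a : Char) : pvNd [a] = 0 := by simp [pvNd, pvPairs_single]
theorem pvNd_nil : pvNd [] = 0 := by simp [pvNd, pvPairs_nil]

theorem pvBadB_cons (a b : Char) (l : List Char) :
    pvBadB (a :: b :: l) = (decide ([a, b] ∈ pvBaddies) || pvBadB (b :: l)) := by
  simp [pvBadB, pvPairs_cons]

theorem pvBadB_single (a : Char) : pvBadB [a] = false := by simp [pvBadB, pvPairs_single]
theorem pvBadB_nil : pvBadB [] = false := by simp [pvBadB, pvPairs_nil]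

theorem count_baddies_single (x : Char) : pvBaddies.count [x] = 0 := by
  simp [pvBaddies]

theorem vowel_bridge (c : Char) :
    (pvVowels.count c ≠ 0) ↔ (c ∈ "aeiou".toList) := by
  have hl : "aeiou".toList = pvVowels := by decide
  rw [hl, ← Nat.pos_iff_ne_zero, List.count_pos_iff]

-- characterization of A's loop on the suffix it still has to scan
theorem go_spec (cs : List Char) (i vc dc : Nat) :
    validate1Go cs i vc dc =
      if pvBadB (cs.drop i) then 0
      else if 3 ≤ vc + pvNv (cs.drop i) ∧ 1 ≤ dc + pvNd (cs.drop i) then 1 else 0 := by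
  induction hn : cs.length - i using Nat.strong_induction_on generalizing i vc dc with
  | _ n ih =>
  by_cases h : i < cs.length
  · have hslice : PySem.List.slice cs (some (i : Int)) (some ((i : Int) + 2)) = (cs.drop i).take 2 := by
      have := PySem.List.slice_natCast_add (xs := cs) (j := i) (n := 2)
      simpa using this
    have hdrop : cs.drop i = cs[i] :: cs.drop (i + 1) := List.drop_eq_getElem_cons h
    rw [validate1Go]
    simp only [h, dif_pos, hslice, hdrop]
    have ih' := fun vc dc => ih (cs.length - (i+1)) (by omega) (i+1) vc dc rfl
    cases htl : cs.drop (i + 1) with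
    | nil =>
      simp only [List.take]
      rw [if_neg (by simp [count_baddies_single]), ih', htl]
      simp only [pvBadB_nil, pvBadB_single, pvNv_nil, pvNv_cons, pvNd_nil, pvNd_single,
        vowel_bridge cs[i], List.length_cons, List.length_nil, Bool.false_eq_true, if_false]
      norm_num
      split_ifs <;> first | rfl | omega
    | cons b rest =>
      simp only [List.take, List.getD_cons_zero, List.getD_cons_succ]
      by_cases hbad : pvBaddies.count [cs[i], b] ≠ 0
      · rw [if_pos hbad]
        have hmem : [cs[i], b] ∈ pvBaddies := List.count_pos_iff.mp (Nat.pos_of_ne_zero hbad)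
        rw [pvBadB_cons]
        simp [hmem]
      · rw [if_neg hbad, ih', htl]
        have hmem : ¬ [cs[i], b] ∈ pvBaddies := by
          intro hc; exact hbad (Nat.pos_iff_ne_zero.mp (List.count_pos_iff.mpr hc))
        have hdec : decide ([cs[i], b] ∈ pvBaddies) = false := decide_eq_false hmem
        simp only [pvBadB_cons, pvNv_cons, pvNd_cons, hdec, Bool.false_or,
          vowel_bridge cs[i], List.length_cons, List.length_nil]
        norm_num
        split_ifs <;> first | rfl | omega
  · have hdrop : cs.drop i = [] := List.drop_eq_nil_of_le (by omega)
    rw [validate1Go]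
    simp [h, hdrop, pvBadB_nil, pvNv_nil, pvNd_nil]

-- a two-character list is an infix exactly when it is an adjacent pair
theorem infix_pair (a b : Char) (cs : List Char) :
    [a, b] <:+: cs ↔ (a, b) ∈ pvPairs cs := by
  induction cs with
  | nil =>
    simp [pvPairs_nil]
  | cons c t ih =>
    rw [List.infix_cons_iff]
    cases t with
    | nil =>
      rw [pvPairs_single]
      constructor
      · rintro (hp | hi)
        · have := hp.length_le; simp at this
        · simp at hi
      · intro hc; simp at hc
    | cons d t' =>
      rw [pvPairs_cons, List.mem_cons]
      constructor
      · rintro (hp | hi)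
        · rw [List.cons_prefix_cons] at hp
          obtain ⟨rfl, hp⟩ := hp
          rw [List.cons_prefix_cons] at hp
          obtain ⟨rfl, _⟩ := hp
          exact Or.inl rfl
        · exact Or.inr (ih.mp hi)
      · rintro (heq | htail)
        · obtain ⟨rfl, rfl⟩ := Prod.mk.injEq a b c d ▸ heq
          exact Or.inl (List.cons_prefix_cons.mpr ⟨rfl, List.cons_prefix_cons.mpr ⟨rfl, List.nil_prefix⟩⟩)
        · exact Or.inr (ih.mpr htail)

theorem isIn_pair (a b : Char) (word : String) :
    PySem.Str.isIn (String.ofList [a, b]) word = decide ((a, b) ∈ pvPairs word.toList) := by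
  have hstr : PySem.Str.isIn (String.ofList [a, b]) word
      = PySem.Chars.isIn [a, b] word.toList := by simp [PySem.Str.isIn]
  rw [hstr]
  by_cases h : [a, b] <:+: word.toList
  · rw [(PySem.Chars.isIn_iff_infix [a, b] word.toList).mpr h,
      decide_eq_true ((infix_pair a b word.toList).mp h)]
  · have h1 : PySem.Chars.isIn [a, b] word.toList = false :=
      Bool.eq_false_iff.mpr (fun hc => h ((PySem.Chars.isIn_iff_infix [a, b] word.toList).mp hc))
    rw [h1, Eq.comm, decide_eq_false_iff_not]
    exact fun hc => h ((infix_pair a b word.toList).mpr hc)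

theorem hasBad_bridge (word : String) :
    ((["ab", "cd", "pq", "xy"] : List String).any (fun b => PySem.Str.isIn b word))
      = pvBadB word.toList := by
  have e1 : PySem.Str.isIn "ab" word = decide (('a', 'b') ∈ pvPairs word.toList) := isIn_pair 'a' 'b' word
  have e2 : PySem.Str.isIn "cd" word = decide (('c', 'd') ∈ pvPairs word.toList) := isIn_pair 'c' 'd' word
  have e3 : PySem.Str.isIn "pq" word = decide (('p', 'q') ∈ pvPairs word.toList) := isIn_pair 'p' 'q' word
  have e4 : PySem.Str.isIn "xy" word = decide (('x', 'y') ∈ pvPairs word.toList) := isIn_pair 'x' 'y' word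
  simp only [List.any_cons, List.any_nil, e1, e2, e3, e4, Bool.or_false, pvBadB]
  rcases Bool.eq_false_or_eq_true ((pvPairs word.toList).any (fun p => decide ([p.1, p.2] ∈ pvBaddies))) with hr | hr
  case inr =>
    rw [hr]
    have hall := List.any_eq_false.mp hr
    simp only [Bool.or_eq_false_iff, decide_eq_false_iff_not]
    refine ⟨fun hc => ?_, fun hc => ?_, fun hc => ?_, fun hc => ?_⟩
    all_goals (have h5 := hall _ hc; simp [pvBaddies] at h5)
  case inl =>
    rw [hr]
    obtain ⟨⟨x, y⟩, hm, hb⟩ := List.any_eq_true.mp hr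
    have hxy : (x = 'a' ∧ y = 'b') ∨ (x = 'c' ∧ y = 'd') ∨ (x = 'p' ∧ y = 'q') ∨ (x = 'x' ∧ y = 'y') := by
      simpa [pvBaddies] using hb
    rcases hxy with ⟨rfl, rfl⟩ | ⟨rfl, rfl⟩ | ⟨rfl, rfl⟩ | ⟨rfl, rfl⟩ <;> simp [hm]

theorem nd_pos_iff (l : List Char) :
    (1 ≤ pvNd l) ↔ ((l.zip l.tail).any (fun p => p.1 == p.2) = true) := by
  rw [List.any_eq_true]
  simp only [pvNd, pvPairs]
  rw [Nat.one_le_iff_ne_zero, ← Nat.pos_iff_ne_zero, List.countP_pos_iff]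

-- ===== VERDICT (by name: the statement is the Claim_ definition above) =====
theorem validate1_spec : Claim_equal_validate1 := by
  intro word _
  show validate1 word = validate1_alt word
  unfold validate1 validate1_alt
  rw [go_spec]
  simp only [List.drop_zero, Nat.zero_add, hasBad_bridge word]
  by_cases hbad : pvBadB word.toList = true
  · rw [if_pos hbad, if_neg]
    rintro ⟨-, -, hfalse⟩
    rw [hbad] at hfalse
    exact Bool.true_eq_false.mp hfalse
  · rw [Bool.not_eq_true] at hbad
    rw [if_neg (by rw [hbad]; exact Bool.false_ne_true)]
    by_cases hv : 3 ≤ pvNv word.toList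
    · by_cases hd : ((word.toList.zip word.toList.tail).any (fun p => p.1 == p.2)) = true
      · rw [if_pos ⟨hv, (nd_pos_iff word.toList).mpr hd⟩, if_pos ⟨hv, hd, hbad⟩]
      · rw [if_neg (fun hc => hd ((nd_pos_iff word.toList).mp hc.2)),
          if_neg (fun hc => hd hc.2.1)]
    · rw [if_neg (fun hc => hv hc.1), if_neg (fun hc => hv hc.1)]
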